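-- pv_equiv track=rewrite | github.com/dangerisom/Isom-Lab | github_website/projects/superdarks/code/2-post_query_analysis/1-upset_analysis_on_filtered_hits.py | compute_global_intersection_and_complements
-- ===== SOURCE A (Python) =====
-- from typing import Iterable, Dict, List, Tuple, Set
--
-- def compute_global_intersection_and_complements(domains: List[str], d2h: Dict[str, Set[str]]) -> Tuple[Set[str], Dict[str, Set[str]]]:
--     sets = [d2h[d] for d in domains]
--     if not sets:
--         inter = set()
--     elif len(sets) == 1:
--         inter = set(sets[0])
--     else:
--         inter = set.intersection(*sets)
--     comps = {d: d2h[d] - inter for d in domains}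
--     return inter, comps
-- ===== SOURCE B (Python) =====
-- def compute_global_intersection_and_complements(domains, d2h):
--     counts = {}
--     for d in domains:
--         for e in d2h[d]:
--             counts[e] = counts.get(e, 0) + 1
--     n = len(domains)
--     inter = {e for e, c in counts.items() if c == n}
--     comps = {d: {e for e in d2h[d] if e not in inter} for d in domains}
--     return inter, comps
-- ===== Notes on version B (the rewrite author's own statement) =====
-- stated objective: alternative
-- what changed: B replaces A's build-a-list-of-sets + set.intersection(*sets) (with its three-way empty/single/many branching) by a single counting pass: one occurrence counter over all hit sets, the global intersection being the elements whose count equals len(domains); complements are then derived from that set with no special cases.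
import Mathlib
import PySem

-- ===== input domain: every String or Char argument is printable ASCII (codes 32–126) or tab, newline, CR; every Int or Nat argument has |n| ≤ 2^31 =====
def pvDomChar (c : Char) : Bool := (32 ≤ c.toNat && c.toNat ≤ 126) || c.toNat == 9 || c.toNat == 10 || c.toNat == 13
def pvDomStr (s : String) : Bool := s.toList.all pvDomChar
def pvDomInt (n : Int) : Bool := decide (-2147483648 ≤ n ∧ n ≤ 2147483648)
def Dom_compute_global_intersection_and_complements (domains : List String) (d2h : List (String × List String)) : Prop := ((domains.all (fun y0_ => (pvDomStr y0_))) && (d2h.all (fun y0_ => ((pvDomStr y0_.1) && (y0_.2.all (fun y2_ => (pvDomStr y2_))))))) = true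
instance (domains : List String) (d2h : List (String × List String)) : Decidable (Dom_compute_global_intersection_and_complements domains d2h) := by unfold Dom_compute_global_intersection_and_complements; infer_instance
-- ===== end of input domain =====

-- B replaces A's list-of-sets + set.intersection with a single counting pass
-- (an element is in the global intersection iff its count equals len(domains)); alternative decomposition, same results.

-- shared helper: d2h[d] (both Pythons index the same dict; the [] default is never reached inside Pre_)
def pvLookup (d2h : List (String × List String)) (d : String) : List String :=
  (PySem.Dict.mk d2h).getD d []

-- ===== PORT A =====
def compute_global_intersection_and_complements (domains : List String) (d2h : List (String × List String)) : List String × (List (String × List String)) :=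
  let sets := domains.map (fun d => pvLookup d2h d)
  let inter := match sets with
    | [] => []
    | [s] => PySem.Set.ofList s
    | s :: rest => s.filter (fun e => rest.all (fun t => t.contains e))
  let comps := domains.foldl (fun acc d => acc.insert d (PySem.Set.diff (pvLookup d2h d) inter)) PySem.Dict.empty
  (inter, comps.items)

-- ===== PORT B =====
def compute_global_intersection_and_complements_alt (domains : List String) (d2h : List (String × List String)) : List String × (List (String × List String)) :=
  let counts := domains.foldl (fun c d => (pvLookup d2h d).foldl (fun c e => c.modify e 0 (· + 1)) c) PySem.Dict.empty
  let n := PySem.List.len domains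
  let inter := (counts.items.filter (fun p => p.2 == n)).map (fun p => p.1)
  let comps := domains.foldl (fun acc d => acc.insert d ((pvLookup d2h d).filter (fun e => !(inter.contains e)))) PySem.Dict.empty
  (inter, comps.items)

-- ===== PRECONDITION & SPEC =====
-- Pre_ excludes inputs where some domain is missing from d2h's keys (Python A raises KeyError there)
-- and requires each d2h value list to be duplicate-free, since it represents a Python set.
def Pre_compute_global_intersection_and_complements (domains : List String) (d2h : List (String × List String)) : Prop :=
  (∀ d ∈ domains, (PySem.Dict.mk d2h).contains d = true) ∧ (∀ p ∈ d2h, p.2.Nodup)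
instance (domains : List String) (d2h : List (String × List String)) : Decidable (Pre_compute_global_intersection_and_complements domains d2h) := by unfold Pre_compute_global_intersection_and_complements; infer_instance

def pvWitness_compute_global_intersection_and_complements : List String × (List (String × List String)) :=
  (["a", "b"], [("a", ["x", "y"]), ("b", ["y", "z"])])

def Spec_compute_global_intersection_and_complements (domains : List String) (d2h : List (String × List String)) (out : List String × (List (String × List String))) : Prop := out = compute_global_intersection_and_complements_alt domains d2h
instance (domains : List String) (d2h : List (String × List String)) (out : List String × (List (String × List String))) : Decidable (Spec_compute_global_intersection_and_complements domains d2h out) := by unfold Spec_compute_global_intersection_and_complements; infer_instance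

-- ===== CLAIM (what is proved, stated in full; the proofs are below) =====
def Claim_equal_compute_global_intersection_and_complements : Prop := ∀ (domains : List String) (d2h : List (String × List String)), Dom_compute_global_intersection_and_complements domains d2h → Pre_compute_global_intersection_and_complements domains d2h → Spec_compute_global_intersection_and_complements domains d2h (compute_global_intersection_and_complements domains d2h)

-- ===== LEMMAS AND PROOFS =====

-- every value pvLookup produces is duplicate-free (it is [] or one of d2h's value lists)
lemma pvLookup_nodup (d2h : List (String × List String)) (h : ∀ p ∈ d2h, p.2.Nodup) (d : String) :
    (pvLookup d2h d).Nodup := by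
  unfold pvLookup
  rcases hg : (PySem.Dict.mk d2h).get? d with _ | v
  · rw [PySem.Dict.getD_of_get?_eq_none _ [] hg]; exact List.nodup_nil
  · rw [PySem.Dict.getD_of_get?_eq_some _ [] hg]
    exact h (d, v) (PySem.Dict.mem_items_of_get?_eq_some _ hg)

-- counting e over the concatenation of duplicate-free lists counts the lists containing e
lemma pv_count_flat (g : String → List String) (domains : List String) (e : String)
    (h : ∀ d, (g d).Nodup) :
    ((domains.map g).flatten).count e = domains.countP (fun d => (g d).contains e) := by
  induction domains with
  | nil => rfl
  | cons d ds ih =>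
    simp only [List.map_cons, List.flatten_cons, List.count_append, List.countP_cons]
    rw [ih]
    by_cases he : e ∈ g d
    · have h1 : (g d).count e = 1 := List.count_eq_one_of_mem (h d) he
      simp [he, h1]; omega
    · have h0 : (g d).count e = 0 := List.count_eq_zero.mpr he
      simp [he, h0]

-- B's filter predicate 'count e == len(domains)' says: e belongs to every listed set
lemma pv_q_iff (g : String → List String) (domains : List String) (e : String)
    (h : ∀ d, (g d).Nodup) :
    ((((domains.map g).flatten).count e : Int) == (domains.length : Int))
      = domains.all (fun d => (g d).contains e) := by
  rw [Bool.eq_iff_iff]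
  simp only [beq_iff_eq, Nat.cast_inj, List.all_eq_true]
  rw [pv_count_flat g domains e h]
  exact List.countP_eq_length

-- the nonempty-domains core: filtering the first set by membership in the rest
-- equals filtering the first-appearance-ordered element pool by 'count == len'
lemma pv_key (g : String → List String) (h : ∀ d, (g d).Nodup) (d : String) (ds : List String) :
    (g d).filter (fun e => (ds.map g).all (fun t => t.contains e)) =
    (PySem.Set.ofList (((d :: ds).map g).flatten)).filter
      (fun k => (((((d :: ds).map g).flatten).count k : Int) == ((d :: ds).length : Int))) := by
  have hx : ((d :: ds).map g).flatten = g d ++ (ds.map g).flatten := by simp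
  rw [hx, PySem.Set.ofList_append, PySem.Set.update_eq_append_filter,
    PySem.Set.ofList_eq_self_of_nodup _ (h d), List.filter_append]
  have h2 : (List.filter (fun y => !PySem.Set.contains (g d) y)
        (PySem.Set.ofList ((ds.map g).flatten))).filter
        (fun k => (((g d ++ (ds.map g).flatten).count k : Int) == ((d :: ds).length : Int))) = [] := by
    rw [List.filter_eq_nil_iff]
    intro a ha
    have hnotin : a ∉ g d := by
      have := (List.mem_filter.mp ha).2
      simpa using this
    have hq := pv_q_iff g (d :: ds) a h
    simp only [List.map_cons, List.flatten_cons] at hq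
    rw [hq]
    simp only [List.all_cons, Bool.and_eq_true]
    intro hcontr
    exact hnotin (by simpa using hcontr.1)
  rw [h2, List.append_nil]
  apply List.filter_congr
  intro e he
  have hq := pv_q_iff g (d :: ds) e h
  simp only [List.map_cons, List.flatten_cons] at hq
  rw [hq]
  have hcomp : ((fun t => decide (e ∈ t)) ∘ g) = fun d => decide (e ∈ g d) := rfl
  simp [hcomp, he]

-- A's three-way intersection expression equals B's count-based filter, in the same order
lemma pv_inter_eq (g : String → List String) (domains : List String)
    (h : ∀ d, (g d).Nodup) :
    (match domains.map g with
      | [] => ([] : List String)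
      | [s] => PySem.Set.ofList s
      | s :: rest => s.filter (fun e => rest.all (fun t => t.contains e)))
    = (PySem.Set.ofList ((domains.map g).flatten)).filter
        (fun k => ((((domains.map g).flatten).count k : Int) == (domains.length : Int))) := by
  match domains with
  | [] => rfl
  | [d] =>
    have key := pv_key g h d []
    simp only [List.map_nil, List.all_nil, List.filter_true] at key
    show PySem.Set.ofList (g d) = _
    rw [PySem.Set.ofList_eq_self_of_nodup _ (h d)]
    simpa using key
  | d :: d' :: ds =>
    have key := pv_key g h d (d' :: ds)
    simpa using key

-- ===== VERDICT (by name: the statement is the Claim_ definition above) =====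
theorem compute_global_intersection_and_complements_spec : Claim_equal_compute_global_intersection_and_complements := by
  intro domains d2h _ hpre
  obtain ⟨-, hnd⟩ := hpre
  unfold Spec_compute_global_intersection_and_complements
  unfold compute_global_intersection_and_complements compute_global_intersection_and_complements_alt
  have hg : ∀ d, (pvLookup d2h d).Nodup := pvLookup_nodup d2h hnd
  have hcounts : domains.foldl (fun c d => (pvLookup d2h d).foldl (fun c e => c.modify e 0 (· + 1)) c) PySem.Dict.empty
      = PySem.Dict.counter ((domains.map (pvLookup d2h)).flatten) := by
    rw [PySem.Dict.counter_eq_foldl, List.foldl_flatten, List.foldl_map]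
  have hinterB : ((PySem.Dict.counter ((domains.map (pvLookup d2h)).flatten)).items.filter
        (fun p => p.2 == PySem.List.len domains)).map (fun p => p.1)
      = (PySem.Set.ofList ((domains.map (pvLookup d2h)).flatten)).filter
        (fun k => ((((domains.map (pvLookup d2h)).flatten).count k : Int) == (domains.length : Int))) := by
    rw [PySem.Dict.items_counter, List.filter_map, List.map_map]
    simp [Function.comp_def, PySem.List.len_eq]
  have hinter := pv_inter_eq (fun d => pvLookup d2h d) domains hg
  simp only [hcounts, hinterB, hinter]
  rfl
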